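-- pv_equiv track=rewrite | github.com/opitt/cg-puzzles | alphabetwar.py | alphabet_war
-- ===== SOURCE A (Python) =====
-- def alphabet_war(fight):
--     fight=list(fight)
--     left="wpbst"
--     right="mqdzj"
--     priest="tj"
--     power={"w":4,"p":3,"b":2,"s":1,"t":0,"m":4,"q":3,"d":2,"z":1,"j":0}
--     revert={"wj":"m","pj":"q","bj":"d","sj":"z","mt":"w","qt":"p","dt":"b","zt":"s"}
--     for i,c in enumerate(fight):
--         if c in priest:
--             if i-1>=0 and not any(p in fight[i-2:i] for p in priest):
--                 fight[i-1]=revert.get(fight[i-1]+c,fight[i-1])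
--             if i+1<len(fight) and not any(p in fight[i+1:i+3] for p in priest):
--                 fight[i+1]=revert.get(fight[i+1]+c,fight[i+1])
--
--     leftpower=sum([power.get(c,0) for i,c in enumerate(fight) if c in left])
--     rightpower=sum([power.get(c,0) for i,c in enumerate(fight) if c in right])
--
--     return  "Right side wins!" if leftpower<rightpower else "Left side wins!" if leftpower>rightpower else "Let's fight again!"
-- ===== SOURCE B (Python) =====
-- def alphabet_war(fight):
--     # Pure one-pass version: no mutation.  A letter is reverted exactly when
--     # exactly one of its immediate neighbours is a priest ('t' or 'j');
--     # two priests (or none) around it cancel.  Left and right powers are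
--     # accumulated as one signed total.
--     priest = "tj"
--     power = {"w": 4, "p": 3, "b": 2, "s": 1, "m": -4, "q": -3, "d": -2, "z": -1}
--     revert = {"wj": "m", "pj": "q", "bj": "d", "sj": "z",
--               "mt": "w", "qt": "p", "dt": "b", "zt": "s"}
--     n = len(fight)
--     total = 0
--     for p, c in enumerate(fight):
--         lp = p > 0 and fight[p - 1] in priest
--         rp = p + 1 < n and fight[p + 1] in priest
--         if lp != rp:
--             c = revert.get(c + (fight[p - 1] if lp else fight[p + 1]), c)
--         total += power.get(c, 0)
--     return ("Right side wins!" if total < 0 else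
--             "Left side wins!" if total > 0 else
--             "Let's fight again!")
-- ===== Notes on version B (the rewrite author's own statement) =====
-- stated objective: simpler
-- what changed: A mutates the character list in place while iterating and then re-scans it twice to sum each side's power; B never mutates: in one pass it computes each position's effective letter directly (a letter is reverted exactly when precisely one immediate neighbour is a priest) and accumulates a single signed power total.
import Mathlib
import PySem

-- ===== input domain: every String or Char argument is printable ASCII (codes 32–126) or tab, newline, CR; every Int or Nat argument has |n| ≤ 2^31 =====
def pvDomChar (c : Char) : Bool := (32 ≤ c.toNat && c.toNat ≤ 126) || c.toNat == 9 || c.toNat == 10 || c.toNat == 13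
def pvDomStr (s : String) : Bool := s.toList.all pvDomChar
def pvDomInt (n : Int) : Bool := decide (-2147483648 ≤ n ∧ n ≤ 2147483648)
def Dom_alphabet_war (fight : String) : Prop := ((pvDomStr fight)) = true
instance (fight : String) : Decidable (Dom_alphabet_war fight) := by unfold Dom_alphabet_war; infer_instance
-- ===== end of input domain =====

-- B replaces A's in-place mutation loop by a pure per-position effective-letter
-- computation with one signed power accumulator (objective: simpler, no mutation).

-- ===== PORT A =====
-- shared literal tables of both Pythons
-- 'c in priest' with priest = "tj"
def pvPriest (c : Char) : Bool := c == 't' || c == 'j'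
-- revert.get(a + c, a) on the literal dict revert (keys are two-char strings)
def pvRevertGet (a c : Char) : Char :=
  if a = 'w' ∧ c = 'j' then 'm'
  else if a = 'p' ∧ c = 'j' then 'q'
  else if a = 'b' ∧ c = 'j' then 'd'
  else if a = 's' ∧ c = 'j' then 'z'
  else if a = 'm' ∧ c = 't' then 'w'
  else if a = 'q' ∧ c = 't' then 'p'
  else if a = 'd' ∧ c = 't' then 'b'
  else if a = 'z' ∧ c = 't' then 's'
  else a
-- power.get(c, 0) on A's dict
def pvPowerA (c : Char) : Int :=
  if c = 'w' then 4 else if c = 'p' then 3 else if c = 'b' then 2 else if c = 's' then 1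
  else if c = 't' then 0 else if c = 'm' then 4 else if c = 'q' then 3 else if c = 'd' then 2
  else if c = 'z' then 1 else if c = 'j' then 0 else 0
-- 'c in left' / 'c in right' (single-char membership in the literal strings)
def pvInLeft (c : Char) : Bool := c == 'w' || c == 'p' || c == 'b' || c == 's' || c == 't'
def pvInRight (c : Char) : Bool := c == 'm' || c == 'q' || c == 'd' || c == 'z' || c == 'j'
-- any(p in w for p in priest)
def pvAnyPriestIn (w : List Char) : Bool := ['t', 'j'].any (fun p => w.contains p)

-- one iteration of A's for-loop: i is the enumerate index, s the (mutated) list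
def pvStepA (s : List Char) (i : Nat) : List Char :=
  let c := s.getD i ' '
  if pvPriest c then
    let s1 := if 1 ≤ i ∧ ¬ (pvAnyPriestIn (PySem.List.slice s (some ((i : Int) - 2)) (some (i : Int))) = true)
      then s.set (i - 1) (pvRevertGet (s.getD (i - 1) ' ') c) else s
    if i + 1 < s1.length ∧ ¬ (pvAnyPriestIn (PySem.List.slice s1 (some ((i : Int) + 1)) (some ((i : Int) + 3))) = true)
      then s1.set (i + 1) (pvRevertGet (s1.getD (i + 1) ' ') c) else s1
  else s

def alphabet_war (fight : String) : String :=
  let f0 := fight.toList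
  let f := (List.range f0.length).foldl pvStepA f0
  let leftpower := ((f.filter (fun c => pvInLeft c)).map pvPowerA).sum
  let rightpower := ((f.filter (fun c => pvInRight c)).map pvPowerA).sum
  if leftpower < rightpower then "Right side wins!"
  else if leftpower > rightpower then "Left side wins!"
  else "Let's fight again!"

-- ===== PORT B =====
-- power.get(c, 0) on B's signed dict
def pvPowerB (c : Char) : Int :=
  if c = 'w' then 4 else if c = 'p' then 3 else if c = 'b' then 2 else if c = 's' then 1
  else if c = 'm' then -4 else if c = 'q' then -3 else if c = 'd' then -2 else if c = 'z' then -1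
  else 0

-- B's loop body: the effective letter at position p (no mutation)
def pvEff (l : List Char) (p : Nat) : Char :=
  let c := l.getD p ' '
  let lp := decide (0 < p) && pvPriest (l.getD (p - 1) ' ')
  let rp := decide (p + 1 < l.length) && pvPriest (l.getD (p + 1) ' ')
  if lp ≠ rp then pvRevertGet c (if lp then l.getD (p - 1) ' ' else l.getD (p + 1) ' ') else c

def alphabet_war_alt (fight : String) : String :=
  let l := fight.toList
  let total := (List.range l.length).foldl (fun acc p => acc + pvPowerB (pvEff l p)) 0
  if total < 0 then "Right side wins!"
  else if total > 0 then "Left side wins!"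
  else "Let's fight again!"

-- ===== PRECONDITION & SPEC =====
def Spec_alphabet_war (fight : String) (out : String) : Prop := out = alphabet_war_alt fight
instance (fight : String) (out : String) : Decidable (Spec_alphabet_war fight out) := by unfold Spec_alphabet_war; infer_instance

-- ===== CLAIM (what is proved, stated in full; the proofs are below) =====
def Claim_equal_alphabet_war : Prop := ∀ (fight : String), Dom_alphabet_war fight → Spec_alphabet_war fight (alphabet_war fight)

-- ===== LEMMAS AND PROOFS =====

-- the letter position p carries after only its left neighbour (a priest) has acted
def pvRln (l : List Char) (p : Nat) : Char :=
  if (decide (0 < p) && pvPriest (l.getD (p - 1) ' ')) &&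
     !(decide (p + 1 < l.length) && pvPriest (l.getD (p + 1) ' '))
  then pvRevertGet (l.getD p ' ') (l.getD (p - 1) ' ') else l.getD p ' '

-- the list A's loop has built after k iterations, described per position
def pvStage (l : List Char) (k p : Nat) : Char :=
  if p + 2 ≤ k then pvEff l p else if p ≤ k then pvRln l p else l.getD p ' '

lemma pvRevertGet_priest (a c : Char) (h : pvPriest a = true) : pvRevertGet a c = a := by
  unfold pvPriest at h; unfold pvRevertGet
  split_ifs <;> simp_all

lemma pvPriest_revertGet (a c : Char) : pvPriest (pvRevertGet a c) = pvPriest a := by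
  unfold pvRevertGet
  split_ifs <;> simp_all [pvPriest]

lemma pvAnyPriestIn_eq (w : List Char) : pvAnyPriestIn w = w.any pvPriest := by
  rw [Bool.eq_iff_iff]
  simp only [pvAnyPriestIn, pvPriest, List.any_eq_true, List.contains_iff_mem,
    List.mem_cons, List.not_mem_nil, or_false, Bool.or_eq_true, beq_iff_eq]
  aesop

lemma map_range_getD (l : List Char) : (List.range l.length).map (fun p => l.getD p ' ') = l := by
  apply List.ext_getElem
  · simp
  · intro i h1 h2
    simp [List.getD_eq_getElem?_getD, List.getElem?_eq_getElem h2]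

lemma set_map_range (n j : Nat) (f : Nat → Char) (v : Char) :
    ((List.range n).map f).set j v = (List.range n).map (fun p => if p = j then v else f p) := by
  apply List.ext_getElem
  · simp
  · intro i h1 h2
    simp only [List.getElem_set, List.getElem_map, List.getElem_range]
    by_cases hij : i = j
    · simp [hij]
    · simp only [if_neg hij, if_neg (fun h => hij (Eq.symm h))]

lemma take2_drop (l : List Char) (j : Nat) (h : j + 2 ≤ l.length) :
    (l.drop j).take 2 = [l.getD j ' ', l.getD (j + 1) ' '] := by
  apply List.ext_getElem
  · simp; omega
  · intro i h1 h2
    have hi : i < 2 := by simp at h2; omega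
    simp only [List.getElem_take, List.getElem_drop]
    interval_cases i <;>
      simp [List.getD_eq_getElem?_getD, List.getElem?_eq_getElem (by omega : j < l.length),
        List.getElem?_eq_getElem (by omega : j + 1 < l.length)]

lemma take1_drop (l : List Char) (j : Nat) (h : j + 1 = l.length) :
    (l.drop j).take 2 = [l.getD j ' '] := by
  apply List.ext_getElem
  · simp; omega
  · intro i h1 h2
    have hi : i < 1 := by simp at h2; omega
    simp only [List.getElem_take, List.getElem_drop]
    interval_cases i
    simp [List.getD_eq_getElem?_getD, List.getElem?_eq_getElem (by omega : j < l.length)]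

lemma pvEff_priest (l : List Char) (p : Nat) (h : pvPriest (l.getD p ' ') = true) :
    pvEff l p = l.getD p ' ' := by
  simp only [pvEff]
  split_ifs <;> first | rfl | exact pvRevertGet_priest _ _ h

lemma pvRln_priest (l : List Char) (p : Nat) (h : pvPriest (l.getD p ' ') = true) :
    pvRln l p = l.getD p ' ' := by
  simp only [pvRln]
  split_ifs <;> first | rfl | exact pvRevertGet_priest _ _ h

lemma pvStage_priest (l : List Char) (k p : Nat) :
    pvPriest (pvStage l k p) = pvPriest (l.getD p ' ') := by
  simp only [pvStage, pvEff, pvRln]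
  split_ifs <;> simp [pvPriest_revertGet]

-- when the right neighbour is no priest, the effective letter is the left-acted letter
lemma pvEff_eq_rln (l : List Char) (p : Nat)
    (h : (decide (p + 1 < l.length) && pvPriest (l.getD (p + 1) ' ')) = false) :
    pvEff l p = pvRln l p := by
  simp only [pvEff, pvRln, h]
  split_ifs <;> simp_all

lemma pvRln_no_left (l : List Char) (p : Nat)
    (h : (decide (0 < p) && pvPriest (l.getD (p - 1) ' ')) = false) :
    pvRln l p = l.getD p ' ' := by
  simp only [pvRln, h]
  simp

lemma pvEff_right (l : List Char) (p : Nat)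
    (hr : (decide (p + 1 < l.length) && pvPriest (l.getD (p + 1) ' ')) = true)
    (hl : (decide (0 < p) && pvPriest (l.getD (p - 1) ' ')) = false) :
    pvEff l p = pvRevertGet (l.getD p ' ') (l.getD (p + 1) ' ') := by
  simp only [pvEff, hr, hl]
  simp

lemma pvRln_revert (l : List Char) (p : Nat)
    (hl : (decide (0 < p) && pvPriest (l.getD (p - 1) ' ')) = true)
    (hr : (decide (p + 1 < l.length) && pvPriest (l.getD (p + 1) ' ')) = false) :
    pvRln l p = pvRevertGet (l.getD p ' ') (l.getD (p - 1) ' ') := by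
  simp only [pvRln, hl, hr]
  simp

lemma pvEff_both (l : List Char) (p : Nat)
    (hl : (decide (0 < p) && pvPriest (l.getD (p - 1) ' ')) = true)
    (hr : (decide (p + 1 < l.length) && pvPriest (l.getD (p + 1) ' ')) = true) :
    pvEff l p = l.getD p ' ' := by
  simp only [pvEff, hl, hr]
  simp


lemma pvRln_right (l : List Char) (p : Nat)
    (hr : (decide (p + 1 < l.length) && pvPriest (l.getD (p + 1) ' ')) = true) :
    pvRln l p = l.getD p ' ' := by
  simp only [pvRln, hr]
  simp

lemma getD_mr (n : Nat) (F : Nat → Char) (p : Nat) (hp : p < n) :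
    ((List.range n).map F).getD p ' ' = F p := PySem.List.getD_map_range F n p ' ' hp

lemma stage_succ_no_pri (l : List Char) (k p : Nat)
    (hpri : pvPriest (l.getD k ' ') = false) :
    pvStage l k p = pvStage l (k + 1) p := by
  by_cases h1 : p + 2 ≤ k
  · unfold pvStage; rw [if_pos h1, if_pos (by omega : p + 2 ≤ k + 1)]
  · by_cases h2 : p + 2 = k + 1
    · unfold pvStage
      rw [if_neg h1, if_pos (by omega : p ≤ k), if_pos (by omega : p + 2 ≤ k + 1)]
      refine (pvEff_eq_rln l p ?_).symm
      rw [show p + 1 = k from by omega, hpri]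
      simp
    · by_cases h3 : p ≤ k
      · unfold pvStage
        rw [if_neg h1, if_pos h3, if_neg (by omega : ¬ p + 2 ≤ k + 1), if_pos (by omega : p ≤ k + 1)]
      · by_cases h4 : p = k + 1
        · unfold pvStage
          rw [if_neg h1, if_neg h3, if_neg (by omega : ¬ p + 2 ≤ k + 1), if_pos (by omega : p ≤ k + 1)]
          refine (pvRln_no_left l p ?_).symm
          rw [show p - 1 = k from by omega, hpri]
          simp
        · unfold pvStage
          rw [if_neg h1, if_neg h3, if_neg (by omega : ¬ p + 2 ≤ k + 1), if_neg (by omega : ¬ p ≤ k + 1)]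

lemma stage_succ_pri (l : List Char) (k p : Nat) (hk : k < l.length) (hp : p < l.length)
    (hpri : pvPriest (l.getD k ' ') = true) :
    (if p = k + 1 then pvRln l p else if p = k - 1 then pvEff l p else pvStage l k p)
      = pvStage l (k + 1) p := by
  by_cases h1 : p = k + 1
  · rw [if_pos h1, h1]
    unfold pvStage
    rw [if_neg (by omega), if_pos (by omega)]
  · rw [if_neg h1]
    by_cases h2 : p = k - 1
    · rw [if_pos h2]
      by_cases hk0 : k = 0
      · -- then p = 0 = k: both sides are the (unchangeable) priest letter
        have hp0 : p = 0 := by omega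
        subst hk0; subst hp0
        unfold pvStage
        rw [if_neg (by omega), if_pos (by omega), pvEff_priest l 0 hpri, pvRln_priest l 0 hpri]
      · unfold pvStage
        rw [if_pos (by omega : p + 2 ≤ k + 1)]
    · rw [if_neg h2]
      unfold pvStage
      by_cases h3 : p + 2 ≤ k
      · rw [if_pos h3, if_pos (by omega)]
      · rw [if_neg h3, if_neg (by omega : ¬ p + 2 ≤ k + 1)]
        by_cases h4 : p ≤ k
        · rw [if_pos h4, if_pos (by omega)]
        · rw [if_neg h4, if_neg (by omega : ¬ p ≤ k + 1)]

-- first mutation of iteration k (the write to position k-1), as a pure list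
lemma step1 (l : List Char) (k : Nat) (hk : k < l.length)
    (hpri : pvPriest (l.getD k ' ') = true) :
    (if 1 ≤ k ∧ ¬ (pvAnyPriestIn (PySem.List.slice ((List.range l.length).map (pvStage l k)) (some ((k : Int) - 2)) (some (k : Int))) = true)
      then ((List.range l.length).map (pvStage l k)).set (k - 1)
        (pvRevertGet (((List.range l.length).map (pvStage l k)).getD (k - 1) ' ') (l.getD k ' '))
      else ((List.range l.length).map (pvStage l k)))
    = (List.range l.length).map (fun p => if p = k - 1 then pvEff l p else pvStage l k p) := by
  rcases Nat.lt_or_ge k 1 with hk1 | hk1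
  · -- k = 0: the guard 1 ≤ k fails, and position k-1 = 0 is the priest itself
    have hk0 : k = 0 := by omega
    subst hk0
    rw [if_neg (by rintro ⟨h, -⟩; omega)]
    apply List.map_congr_left
    intro p hp
    rw [List.mem_range] at hp
    by_cases hp0 : p = 0 - 1
    · have hpz : p = 0 := by omega
      subst hpz
      rw [if_pos hp0]
      unfold pvStage
      rw [if_neg (by omega), if_pos (by omega), pvRln_priest l 0 hpri, pvEff_priest l 0 hpri]
    · rw [if_neg hp0]
  · by_cases hk2 : 2 ≤ k
    · -- the window fight[k-2:k] holds positions k-2 and k-1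
      have hrp : (decide (k - 1 + 1 < l.length) && pvPriest (l.getD (k - 1 + 1) ' ')) = true := by
        rw [show k - 1 + 1 = k from by omega]
        simp only [decide_eq_true hk, Bool.true_and]
        exact hpri
      have hstage : pvStage l k (k - 1) = l.getD (k - 1) ' ' := by
        unfold pvStage
        rw [if_neg (by omega), if_pos (by omega)]
        exact pvRln_right l (k - 1) hrp
      rw [show ((k : Int) - 2) = (((k - 2 : Nat)) : Int) from by omega,
        PySem.List.slice_natCast, show k - (k - 2) = 2 from by omega,
        take2_drop _ (k - 2) (by simp; omega), show k - 2 + 1 = k - 1 from by omega,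
        getD_mr l.length (pvStage l k) (k - 2) (by omega),
        getD_mr l.length (pvStage l k) (k - 1) (by omega), pvAnyPriestIn_eq]
      simp only [List.any_cons, List.any_nil, Bool.or_false, pvStage_priest]
      by_cases hw : (pvPriest (l.getD (k - 2) ' ') || pvPriest (l.getD (k - 1) ' ')) = true
      · rw [if_neg (by rintro ⟨-, hn⟩; exact hn hw)]
        apply List.map_congr_left
        intro p hp
        rw [List.mem_range] at hp
        by_cases hpk : p = k - 1
        · rw [if_pos hpk, hpk, hstage]
          rcases Bool.or_eq_true_iff.mp hw with hw1 | hw2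
          · refine (pvEff_both l (k - 1) ?_ hrp).symm
            rw [show k - 1 - 1 = k - 2 from by omega]
            simp only [decide_eq_true (by omega : 0 < k - 1), Bool.true_and]
            exact hw1
          · exact (pvEff_priest l (k - 1) hw2).symm
        · rw [if_neg hpk]
      · rw [if_pos ⟨by omega, hw⟩, hstage, set_map_range]
        simp only [Bool.or_eq_true, not_or] at hw
        apply List.map_congr_left
        intro p hp
        rw [List.mem_range] at hp
        by_cases hpk : p = k - 1
        · rw [if_pos hpk, if_pos hpk, hpk]
          refine ((pvEff_right l (k - 1) hrp ?_).trans ?_).symm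
          · rw [show k - 1 - 1 = k - 2 from by omega,
              Bool.eq_false_iff.mpr hw.1, Bool.and_false]
          · rw [show k - 1 + 1 = k from by omega]
        · rw [if_neg hpk, if_neg hpk]
    · -- k = 1: the slice fight[-1:1] is empty, so the write is unguarded
      have hk1' : k = 1 := by omega
      subst hk1'
      have hn2 : 2 ≤ l.length := by omega
      have hnil : PySem.List.slice ((List.range l.length).map (pvStage l 1)) (some ((((1 : Nat)) : Int) - 2)) (some (((1 : Nat)) : Int)) = [] := by
        apply List.eq_nil_of_length_eq_zero
        rw [PySem.List.length_slice]
        rw [show ((((1 : Nat)) : Int) - 2) = -1 from by norm_num, PySem.List.clampIdx_neg_one,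
          PySem.List.clampIdx_natCast]
        simp only [List.length_map, List.length_range]
        omega
      rw [hnil, if_pos ⟨le_refl 1, by decide⟩,
        getD_mr l.length (pvStage l 1) (1 - 1) (by omega)]
      have h0 : pvStage l 1 (1 - 1) = l.getD 0 ' ' := by
        unfold pvStage
        rw [if_neg (by omega), if_pos (by omega)]
        exact pvRln_no_left l (1 - 1) (by simp)
      rw [h0, set_map_range]
      apply List.map_congr_left
      intro p hp
      rw [List.mem_range] at hp
      by_cases hpk : p = 1 - 1
      · rw [if_pos hpk, if_pos hpk, hpk]
        refine (pvEff_right l (1 - 1) ?_ (by simp)).symm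
        simp only [show (1 : Nat) - 1 + 1 = 1 from by omega,
          decide_eq_true (by omega : 1 < l.length), Bool.true_and]
        exact hpri
      · rw [if_neg hpk, if_neg hpk]

-- second mutation of iteration k (the write to position k+1), as a pure list
lemma step2 (l : List Char) (k : Nat) (F1 : Nat → Char) (hk : k < l.length)
    (hpri : pvPriest (l.getD k ' ') = true)
    (hg1 : ∀ p, p < l.length → k + 1 ≤ p → F1 p = l.getD p ' ') :
    (if k + 1 < ((List.range l.length).map F1).length ∧ ¬ (pvAnyPriestIn (PySem.List.slice ((List.range l.length).map F1) (some ((k : Int) + 1)) (some ((k : Int) + 3))) = true)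
      then ((List.range l.length).map F1).set (k + 1)
        (pvRevertGet (((List.range l.length).map F1).getD (k + 1) ' ') (l.getD k ' '))
      else ((List.range l.length).map F1))
    = (List.range l.length).map (fun p => if p = k + 1 then pvRln l p else F1 p) := by
  rw [List.length_map, List.length_range]
  by_cases h1 : k + 1 < l.length
  · rw [show ((k : Int) + 1) = (((k + 1 : Nat)) : Int) from by push_cast; ring,
      show ((k : Int) + 3) = (((k + 3 : Nat)) : Int) from by push_cast; ring,
      PySem.List.slice_natCast, show k + 3 - (k + 1) = 2 from by omega]
    rw [getD_mr l.length F1 (k + 1) h1, hg1 (k + 1) h1 (by omega)]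
    by_cases h2 : k + 2 < l.length
    · rw [take2_drop _ (k + 1) (by simp; omega), show k + 1 + 1 = k + 2 from by omega,
        getD_mr l.length F1 (k + 1) h1, getD_mr l.length F1 (k + 2) h2,
        hg1 (k + 1) h1 (by omega), hg1 (k + 2) h2 (by omega), pvAnyPriestIn_eq]
      simp only [List.any_cons, List.any_nil, Bool.or_false]
      by_cases hw : (pvPriest (l.getD (k + 1) ' ') || pvPriest (l.getD (k + 2) ' ')) = true
      · rw [if_neg (by rintro ⟨-, hn⟩; exact hn hw)]
        apply List.map_congr_left
        intro p hp
        rw [List.mem_range] at hp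
        by_cases hpk : p = k + 1
        · rw [if_pos hpk, hpk, hg1 (k + 1) h1 (by omega)]
          rcases Bool.or_eq_true_iff.mp hw with hw1 | hw2
          · exact (pvRln_priest l (k + 1) hw1).symm
          · refine (pvRln_right l (k + 1) ?_).symm
            rw [show k + 1 + 1 = k + 2 from by omega]
            simp only [decide_eq_true h2, Bool.true_and]
            exact hw2
        · rw [if_neg hpk]
      · rw [if_pos ⟨h1, hw⟩, set_map_range]
        apply List.map_congr_left
        intro p hp
        rw [List.mem_range] at hp
        by_cases hpk : p = k + 1
        · rw [if_pos hpk, if_pos hpk, hpk]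
          simp only [Bool.or_eq_true, not_or] at hw
          refine (pvRln_revert l (k + 1) ?_ ?_).symm
          · rw [Nat.add_sub_cancel]
            simp only [decide_eq_true (Nat.succ_pos k), Bool.true_and]
            exact hpri
          · rw [show k + 1 + 1 = k + 2 from by omega,
              Bool.eq_false_iff.mpr hw.2, Bool.and_false]
        · rw [if_neg hpk, if_neg hpk]
    · have hn : k + 2 = l.length := by omega
      rw [take1_drop _ (k + 1) (by simp [hn]), getD_mr l.length F1 (k + 1) h1,
        hg1 (k + 1) h1 (by omega), pvAnyPriestIn_eq]
      simp only [List.any_cons, List.any_nil, Bool.or_false]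
      by_cases hw : pvPriest (l.getD (k + 1) ' ') = true
      · rw [if_neg (by rintro ⟨-, hn'⟩; exact hn' hw)]
        apply List.map_congr_left
        intro p hp
        rw [List.mem_range] at hp
        by_cases hpk : p = k + 1
        · rw [if_pos hpk, hpk, hg1 (k + 1) h1 (by omega)]
          exact (pvRln_priest l (k + 1) hw).symm
        · rw [if_neg hpk]
      · rw [if_pos ⟨h1, hw⟩, set_map_range]
        apply List.map_congr_left
        intro p hp
        rw [List.mem_range] at hp
        by_cases hpk : p = k + 1
        · rw [if_pos hpk, if_pos hpk, hpk]
          refine (pvRln_revert l (k + 1) ?_ ?_).symm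
          · rw [Nat.add_sub_cancel]
            simp only [decide_eq_true (Nat.succ_pos k), Bool.true_and]
            exact hpri
          · rw [show k + 1 + 1 = k + 2 from by omega,
              decide_eq_false (by omega : ¬ k + 2 < l.length), Bool.false_and]
        · rw [if_neg hpk, if_neg hpk]
  · rw [if_neg (by rintro ⟨h, -⟩; exact h1 h)]
    apply List.map_congr_left
    intro p hp
    rw [List.mem_range] at hp
    rw [if_neg (by omega : ¬ p = k + 1)]

lemma pvStep_state (l : List Char) (k : Nat) (hk : k < l.length) :
    pvStepA ((List.range l.length).map (pvStage l k)) k = (List.range l.length).map (pvStage l (k + 1)) := by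
  simp only [pvStepA]
  rw [getD_mr l.length (pvStage l k) k hk]
  by_cases hpri : pvPriest (l.getD k ' ') = true
  · have hc : pvStage l k k = l.getD k ' ' := by
      unfold pvStage
      rw [if_neg (by omega : ¬ k + 2 ≤ k), if_pos (le_refl k)]
      exact pvRln_priest l k hpri
    rw [hc, if_pos hpri, step1 l k hk hpri,
      step2 l k _ hk hpri (by
        intro p hp hkp
        rw [if_neg (by omega : ¬ p = k - 1)]
        unfold pvStage
        rw [if_neg (by omega), if_neg (by omega)])]
    apply List.map_congr_left
    intro p hp
    rw [List.mem_range] at hp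
    exact stage_succ_pri l k p hk hp hpri
  · rw [if_neg (by rw [pvStage_priest]; exact hpri)]
    apply List.map_congr_left
    intro p hp
    rw [List.mem_range] at hp
    exact stage_succ_no_pri l k p (by simpa using hpri)

lemma pvLoop (l : List Char) (k : Nat) (hk : k ≤ l.length) :
    (List.range k).foldl pvStepA l = (List.range l.length).map (pvStage l k) := by
  induction k with
  | zero =>
    simp only [List.range_zero, List.foldl_nil]
    conv_lhs => rw [← map_range_getD l]
    apply List.map_congr_left
    intro p hp
    simp only [List.mem_range] at hp
    unfold pvStage pvRln
    split_ifs with h1 h2 h3 <;> simp_all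
  | succ k ih =>
    rw [List.range_succ, List.foldl_append, List.foldl_cons, List.foldl_nil,
      ih (by omega), pvStep_state l k (by omega)]

lemma pvStage_final (l : List Char) (p : Nat) (hp : p < l.length) :
    pvStage l l.length p = pvEff l p := by
  unfold pvStage
  by_cases h1 : p + 2 ≤ l.length
  · simp [h1]
  · rw [if_neg h1, if_pos (by omega : p ≤ l.length)]
    refine (pvEff_eq_rln l p ?_).symm
    simp; omega

lemma pvPowerB_split (c : Char) :
    pvPowerB c = (if pvInLeft c then pvPowerA c else 0) - (if pvInRight c then pvPowerA c else 0) := by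
  by_cases h1 : c = 'w'; · subst h1; decide
  by_cases h2 : c = 'p'; · subst h2; decide
  by_cases h3 : c = 'b'; · subst h3; decide
  by_cases h4 : c = 's'; · subst h4; decide
  by_cases h5 : c = 't'; · subst h5; decide
  by_cases h6 : c = 'm'; · subst h6; decide
  by_cases h7 : c = 'q'; · subst h7; decide
  by_cases h8 : c = 'd'; · subst h8; decide
  by_cases h9 : c = 'z'; · subst h9; decide
  by_cases h10 : c = 'j'; · subst h10; decide
  simp [pvPowerB, pvInLeft, pvInRight, h1, h2, h3, h4, h5, h6, h7, h8, h9, h10]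

lemma foldl_map_powerB (F : Nat → Char) (ns : List Nat) (z : Int) :
    ns.foldl (fun acc p => acc + pvPowerB (F p)) z = (ns.map F).foldl (fun a c => a + pvPowerB c) z := by
  induction ns generalizing z with
  | nil => rfl
  | cons x xs ih => simp [List.foldl_cons, ih]

lemma sum_split (F : List Char) (z : Int) :
    F.foldl (fun a c => a + pvPowerB c) z =
      z + (((F.filter (fun c => pvInLeft c)).map pvPowerA).sum
        - ((F.filter (fun c => pvInRight c)).map pvPowerA).sum) := by
  induction F generalizing z with
  | nil => simp
  | cons x xs ih =>
    simp only [List.foldl_cons, ih, List.filter_cons]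
    rw [pvPowerB_split x]
    by_cases h1 : pvInLeft x <;> by_cases h2 : pvInRight x <;> simp [h1, h2] <;> ring

-- ===== VERDICT (by name: the statement is the Claim_ definition above) =====
theorem alphabet_war_spec : Claim_equal_alphabet_war := by
  intro fight _
  unfold Spec_alphabet_war alphabet_war alphabet_war_alt
  simp only
  rw [pvLoop fight.toList fight.toList.length (le_refl _)]
  have hmap : (List.range fight.toList.length).map (pvStage fight.toList fight.toList.length)
      = (List.range fight.toList.length).map (pvEff fight.toList) := by
    apply List.map_congr_left
    intro p hp
    exact pvStage_final _ _ (List.mem_range.mp hp)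
  rw [hmap, foldl_map_powerB (pvEff fight.toList) (List.range fight.toList.length) 0, sum_split]
  set L := ((((List.range fight.toList.length).map (pvEff fight.toList)).filter fun c => pvInLeft c).map pvPowerA).sum with hL
  set R := ((((List.range fight.toList.length).map (pvEff fight.toList)).filter fun c => pvInRight c).map pvPowerA).sum with hR
  rcases lt_trichotomy L R with h | h | h
  · rw [if_pos h, if_pos (by omega : 0 + (L - R) < 0)]
  · rw [if_neg (by omega), if_neg (by omega), if_neg (by omega : ¬ 0 + (L - R) < 0),
      if_neg (by omega : ¬ 0 + (L - R) > 0)]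
  · rw [if_neg (by omega), if_pos (by omega : L > R), if_neg (by omega : ¬ 0 + (L - R) < 0),
      if_pos (by omega : 0 + (L - R) > 0)]
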